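-- pv_equiv track=rewrite | github.com/sfad159357/aoi-ops-platform | services/spc-service/app/rules.py | _all_within_zone
-- ===== SOURCE A (Python) =====
-- def _all_within_zone(zones: list[int], run_length: int, zone_max: int) -> list[int]:
--     """連續 run_length 個點都在 zone_max 以內（用於規則 7：連15點在±1σ內）"""
--     result: list[int] = []
--     n = len(zones)
--     for start in range(n - run_length + 1):
--         window = zones[start:start + run_length]
--         if all(z <= zone_max for z in window):
--             for i in range(start, start + run_length):
--                 if i not in result:
--                     result.append(i)
--     return result
-- ===== SOURCE B (Python) =====
-- def _all_within_zone(zones: list[int], run_length: int, zone_max: int) -> list[int]: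
--     """Single pass over maximal runs of points <= zone_max; emit a run's indices when it is at least run_length long."""
--     if run_length <= 0:
--         return []
--     result: list[int] = []
--     run_start = 0
--     for i, z in enumerate(zones):
--         if z > zone_max:
--             if i - run_start >= run_length:
--                 result.extend(range(run_start, i))
--             run_start = i + 1
--     if len(zones) - run_start >= run_length:
--         result.extend(range(run_start, len(zones)))
--     return result
-- ===== Notes on version B (the rewrite author's own statement) =====
-- stated objective: faster
-- what changed: A slides a window over every start position, re-checks the whole window and deduplicates each index with a linear 'i not in result' scan; B makes one pass tracking the start of the current run of points <= zone_max and emits a run's index interval once, when the run ends (or at the end of the list), if it is at least run_length long.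
import Mathlib
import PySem

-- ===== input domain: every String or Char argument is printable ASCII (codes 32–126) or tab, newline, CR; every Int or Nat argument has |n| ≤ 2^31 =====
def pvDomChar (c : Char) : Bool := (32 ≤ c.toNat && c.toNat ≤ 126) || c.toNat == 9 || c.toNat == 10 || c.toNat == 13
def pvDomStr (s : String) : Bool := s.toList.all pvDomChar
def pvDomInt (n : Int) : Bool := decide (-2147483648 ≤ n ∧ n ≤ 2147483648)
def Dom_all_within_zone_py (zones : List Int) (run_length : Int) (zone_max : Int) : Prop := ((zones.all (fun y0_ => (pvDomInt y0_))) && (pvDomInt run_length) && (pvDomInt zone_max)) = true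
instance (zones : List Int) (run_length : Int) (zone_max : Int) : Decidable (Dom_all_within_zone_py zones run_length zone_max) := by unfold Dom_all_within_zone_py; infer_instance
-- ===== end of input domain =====

-- B replaces A's sliding-window scan with dedup-by-membership by a single pass over
-- maximal runs of points ≤ zone_max, emitting a run's indices once when it is long enough (faster).

-- ===== PORT A =====
def all_within_zone_py (zones : List Int) (run_length : Int) (zone_max : Int) : List Int :=
  let n : Int := PySem.List.len zones
  (PySem.List.pyRange 0 (n - run_length + 1) 1).foldl
    (fun result start =>
      let window := PySem.List.slice zones (some start) (some (start + run_length))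
      if window.all (fun z => decide (z ≤ zone_max)) then
        (PySem.List.pyRange start (start + run_length) 1).foldl
          (fun r i => if i ∈ r then r else r ++ [i]) result
      else result)
    []

-- ===== PORT B =====
def all_within_zone_py_alt (zones : List Int) (run_length : Int) (zone_max : Int) : List Int :=
  if run_length ≤ 0 then []
  else
    let st := (PySem.List.enumerate zones 0).foldl
      (fun (st : List Int × Int) iz =>
        if iz.2 > zone_max then
          (if run_length ≤ iz.1 - st.2 then st.1 ++ PySem.List.pyRange st.2 iz.1 1 else st.1,
           iz.1 + 1)
        else st)
      ([], 0)
    if run_length ≤ PySem.List.len zones - st.2 then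
      st.1 ++ PySem.List.pyRange st.2 (PySem.List.len zones) 1
    else st.1

-- ===== PRECONDITION & SPEC =====
def Spec_all_within_zone_py (zones : List Int) (run_length : Int) (zone_max : Int) (out : List Int) : Prop := out = all_within_zone_py_alt zones run_length zone_max
instance (zones : List Int) (run_length : Int) (zone_max : Int) (out : List Int) : Decidable (Spec_all_within_zone_py zones run_length zone_max out) := by unfold Spec_all_within_zone_py; infer_instance

-- ===== CLAIM (what is proved, stated in full; the proofs are below) =====
def Claim_equal_all_within_zone_py : Prop := ∀ (zones : List Int) (run_length : Int) (zone_max : Int), Dom_all_within_zone_py zones run_length zone_max → Spec_all_within_zone_py zones run_length zone_max (all_within_zone_py zones run_length zone_max)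

-- ===== LEMMAS AND PROOFS =====

-- fold over `range M` following an invariant G
theorem pvFoldlRangeInv {α : Type} (f : α → Nat → α) (G : Nat → α) (M : Nat) (init : α)
    (h0 : G 0 = init)
    (hstep : ∀ k, k < M → f (G k) k = G (k + 1)) :
    (List.range M).foldl f init = G M := by
  subst h0
  induction M with
  | zero => simp
  | succ m ih =>
    rw [List.range_succ, List.foldl_append,
      ih (fun k hk => hstep k (by omega))]
    exact hstep m (by omega)

-- A's inner dedup loop: appending the not-yet-present elements of a duplicate-free list
theorem pvFoldlDedup (L r0 : List Int) (h : L.Nodup) :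
    L.foldl (fun r i => if i ∈ r then r else r ++ [i]) r0
      = r0 ++ L.filter (fun i => !(decide (i ∈ r0))) := by
  induction L generalizing r0 with
  | nil => simp
  | cons x t ih =>
    simp only [List.foldl_cons]
    by_cases hx : x ∈ r0
    · rw [if_pos hx, ih r0 (List.Nodup.of_cons h)]
      simp [hx]
    · rw [if_neg hx, ih (r0 ++ [x]) (List.Nodup.of_cons h)]
      have hxt : x ∉ t := (List.nodup_cons.mp h).1
      have hcong : t.filter (fun i => !(decide (i ∈ r0 ++ [x]))) = t.filter (fun i => !(decide (i ∈ r0))) := by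
        apply List.filter_congr
        intro y hy
        have hyx : y ≠ x := fun e => hxt (e ▸ hy)
        simp [List.mem_append, hyx]
      rw [hcong, List.append_assoc]
      simp [hx]

-- split a filter of a disjunction on a strictly increasing list, when every old (p) element
-- precedes every new (q ∧ ¬p) element
theorem pvFilterOrSplit (p q : Nat → Bool) (l : List Nat) (hl : l.Pairwise (· < ·))
    (hcross : ∀ i j, i ∈ l → j ∈ l → p i = true → q j = true → p j = false → i < j) :
    l.filter (fun x => p x || q x) = l.filter p ++ l.filter (fun x => q x && !p x) := by
  induction l with
  | nil => simp
  | cons x t ih =>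
    obtain ⟨hxlt, hl'⟩ := List.pairwise_cons.mp hl
    have hcross' : ∀ i j, i ∈ t → j ∈ t → p i = true → q j = true → p j = false → i < j :=
      fun i j hi hj => hcross i j (List.mem_cons_of_mem _ hi) (List.mem_cons_of_mem _ hj)
    have iht := ih hl' hcross'
    by_cases hp : p x = true
    · simp [hp, iht]
    · have hpx : p x = false := by simpa using hp
      by_cases hq : q x = true
      · have hnil : t.filter p = [] := by
          rw [List.filter_eq_nil_iff]
          intro i hi hpi
          have h1 := hcross i x (List.mem_cons_of_mem _ hi) List.mem_cons_self hpi hq hpx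
          have h2 := hxlt i hi
          omega
        simp [hpx, hq, iht, hnil]
      · have hqx : q x = false := by simpa using hq
        simp [hpx, hqx, iht]

-- a filter restricted to an index interval inside `range n`
theorem pvFilterInterval (r : Nat → Bool) (s m n : Nat) (h : s + m ≤ n) :
    (List.range n).filter (fun x => (decide (s ≤ x) && decide (x < s + m)) && r x)
      = (List.range' s m).filter r := by
  have e1 : List.range' 0 s ++ List.range' s m = List.range' 0 (s + m) := by
    have := @List.range'_append 0 s m 1
    simpa using this
  have e2 : List.range' 0 (s + m) ++ List.range' (s + m) (n - (s + m)) = List.range' 0 n := by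
    have := @List.range'_append 0 (s + m) (n - (s + m)) 1
    simp at this
    rw [this]
    congr 1
    omega
  have hsplit : List.range n = (List.range' 0 s ++ List.range' s m) ++ List.range' (s + m) (n - (s + m)) := by
    rw [List.range_eq_range', ← e2, ← e1]
  rw [hsplit, List.filter_append, List.filter_append]
  have h1 : (List.range' 0 s).filter (fun x => (decide (s ≤ x) && decide (x < s + m)) && r x) = [] := by
    rw [List.filter_eq_nil_iff]
    intro a ha
    have := List.mem_range'_1.mp ha
    simp only [Bool.and_eq_true, decide_eq_true_eq]
    omega
  have h3 : (List.range' (s + m) (n - (s + m))).filter (fun x => (decide (s ≤ x) && decide (x < s + m)) && r x) = [] := by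
    rw [List.filter_eq_nil_iff]
    intro a ha
    have := List.mem_range'_1.mp ha
    simp only [Bool.and_eq_true, decide_eq_true_eq]
    omega
  have h2 : (List.range' s m).filter (fun x => (decide (s ≤ x) && decide (x < s + m)) && r x)
      = (List.range' s m).filter r := by
    apply List.filter_congr
    intro a ha
    have hb := List.mem_range'_1.mp ha
    have ht : (decide (s ≤ a) && decide (a < s + m)) = true := by
      simp only [Bool.and_eq_true, decide_eq_true_eq]
      omega
    rw [ht, Bool.true_and]
  rw [h1, h2, h3, List.nil_append, List.append_nil]

-- range(a, b) over naturals, as a mapped `List.range'`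
theorem pvPyRangeNat (a b : Nat) :
    PySem.List.pyRange (a : Int) (b : Int) 1 = (List.range' a (b - a)).map (fun (j : Nat) => (j : Int)) := by
  apply List.ext_getElem
  · simp [PySem.List.length_pyRange_one]
  · intro i h1 h2
    rw [PySem.List.getElem_pyRange_one]
    simp [List.getElem_range']

-- "every point of the window zones[k:k+R] is ≤ zm", index-wise
theorem pvWindowAll (zones : List Int) (zm : Int) (R k : Nat) (h : k + R ≤ zones.length) :
    (((zones.drop k).take R).all (fun z => decide (z ≤ zm)) = true)
      ↔ (∀ j, j < k + R → k ≤ j → zones.getD j 0 ≤ zm) := by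
  rw [List.all_eq_true]
  have hlen : (List.take R (List.drop k zones)).length = R := by
    simp [List.length_take, List.length_drop]
    omega
  constructor
  · intro hall j hj1 hj2
    have hjlt : j - k < (List.take R (List.drop k zones)).length := by omega
    have hval : (List.take R (List.drop k zones))[j - k]'hjlt = zones[j]'(by omega) := by
      rw [List.getElem_take, List.getElem_drop]
      congr 1
      omega
    have hthis := hall ((List.take R (List.drop k zones))[j - k]'hjlt) (List.getElem_mem hjlt)
    rw [hval] at hthis
    rw [List.getD_eq_getElem zones 0 (by omega : j < zones.length)]
    exact of_decide_eq_true hthis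
  · intro hgood z hz
    obtain ⟨i, hilen, rfl⟩ := List.mem_iff_getElem.mp hz
    have hiR : i < R := by omega
    have hval : (List.take R (List.drop k zones))[i]'hilen = zones[k + i]'(by omega) := by
      rw [List.getElem_take, List.getElem_drop]
    rw [hval]
    apply decide_eq_true
    have hres := hgood (k + i) (by omega) (by omega)
    rwa [List.getD_eq_getElem zones 0 (by omega)] at hres

-- index i already emitted by A after processing window starts < s
def pvPA (zones : List Int) (zm : Int) (R : Nat) (s i : Nat) : Bool :=
  decide (∃ s' < s, s' ≤ i ∧ i < s' + R ∧ ∀ j < s' + R, s' ≤ j → zones.getD j 0 ≤ zm)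

-- index i already emitted by B after processing the first k points
def pvPB (zones : List Int) (zm : Int) (R : Nat) (k i : Nat) : Bool :=
  decide (∃ b < k, ¬ (zones.getD b 0 ≤ zm) ∧ ∃ a ≤ i, i < b ∧ R ≤ b - a ∧ ∀ j < b, a ≤ j → zones.getD j 0 ≤ zm)

theorem pvPA_iff (zones : List Int) (zm : Int) (R s i : Nat) :
    pvPA zones zm R s i = true
      ↔ ∃ s' < s, s' ≤ i ∧ i < s' + R ∧ ∀ j < s' + R, s' ≤ j → zones.getD j 0 ≤ zm := by
  simp [pvPA]

theorem pvPB_iff (zones : List Int) (zm : Int) (R k i : Nat) :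
    pvPB zones zm R k i = true
      ↔ ∃ b < k, ¬ (zones.getD b 0 ≤ zm) ∧ ∃ a ≤ i, i < b ∧ R ≤ b - a ∧ ∀ j < b, a ≤ j → zones.getD j 0 ≤ zm := by
  simp [pvPB]

-- start of the current run of good points after the first k points
def pvRS (zones : List Int) (zm : Int) : Nat → Nat
  | 0 => 0
  | k + 1 => if zones.getD k 0 ≤ zm then pvRS zones zm k else k + 1

theorem pvRS_le (zones : List Int) (zm : Int) (k : Nat) : pvRS zones zm k ≤ k := by
  induction k with
  | zero => exact Nat.le_of_eq rfl
  | succ m ih => unfold pvRS; split <;> omega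

theorem pvRS_good (zones : List Int) (zm : Int) (k : Nat) :
    ∀ j, pvRS zones zm k ≤ j → j < k → zones.getD j 0 ≤ zm := by
  induction k with
  | zero => omega
  | succ m ih =>
    intro j h1 h2
    unfold pvRS at h1
    split at h1
    · rcases Nat.lt_succ_iff_lt_or_eq.mp h2 with h | h
      · exact ih j h1 h
      · subst h; assumption
    · omega

theorem pvRS_min (zones : List Int) (zm : Int) (k : Nat) :
    ∀ s, (∀ j, s ≤ j → j < k → zones.getD j 0 ≤ zm) → s ≤ k → pvRS zones zm k ≤ s := by
  induction k with
  | zero =>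
    intro s _ _
    have h0 : pvRS zones zm 0 = 0 := rfl
    omega
  | succ m ih =>
    intro s hs hsk
    unfold pvRS
    split
    · by_cases hsm : s ≤ m
      · exact ih s (fun j h1 h2 => hs j h1 (by omega)) hsm
      · have h1 : s = m + 1 := by omega
        have h2 := pvRS_le zones zm m
        omega
    · rename_i hbad
      by_contra hc
      exact hbad (hs m (by omega) (by omega))

-- cast a list of indices to Int
def pvCast (l : List Nat) : List Int := l.map (fun (j : Nat) => (j : Int))

-- A's accumulated result after processing window starts < s
def pvFA (zones : List Int) (zm : Int) (R s : Nat) : List Int :=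
  pvCast ((List.range zones.length).filter (pvPA zones zm R s))

-- B's accumulated result after processing the first k points
def pvFB (zones : List Int) (zm : Int) (R k : Nat) : List Int :=
  pvCast ((List.range zones.length).filter (pvPB zones zm R k))

theorem pvMemCastFilter (p : Nat → Bool) (n j : Nat) (hj : j < n) :
    decide ((j : Int) ∈ pvCast ((List.range n).filter p)) = p j := by
  cases hpj : p j with
  | true =>
    apply decide_eq_true
    simp only [pvCast, List.mem_map, List.mem_filter, List.mem_range]
    exact ⟨j, ⟨hj, hpj⟩, rfl⟩
  | false =>
    apply decide_eq_false
    simp only [pvCast, List.mem_map, List.mem_filter, List.mem_range]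
    rintro ⟨a, ⟨-, hpa⟩, hcast⟩
    have : a = j := by exact_mod_cast hcast
    rw [this] at hpa
    exact absurd hpa (by simp [hpj])

-- everything B has emitted lies strictly below the current run start
theorem pvPBlt (zones : List Int) (zm : Int) (R k : Nat) (x : Nat)
    (h : pvPB zones zm R k x = true) : x < pvRS zones zm k := by
  obtain ⟨b, hbk, hbad, a, hax, hxb, hRba, hgood⟩ := (pvPB_iff zones zm R k x).mp h
  have hbrs : b < pvRS zones zm k := by
    by_contra hc
    exact hbad (pvRS_good zones zm k b (by omega) hbk)
  omega

-- for run_length ≤ 0 A emits nothing: every inner range is empty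
theorem pvA_trivial (zones : List Int) (rl zm : Int) (hrl : rl ≤ 0) :
    all_within_zone_py zones rl zm = [] := by
  have hA : all_within_zone_py zones rl zm
      = (PySem.List.pyRange 0 ((zones.length : Int) - rl + 1) 1).foldl
          (fun result start =>
            if (PySem.List.slice zones (some start) (some (start + rl))).all (fun z => decide (z ≤ zm)) then
              (PySem.List.pyRange start (start + rl) 1).foldl
                (fun r i => if i ∈ r then r else r ++ [i]) result
            else result) [] := rfl
  rw [hA]
  have hcong : ∀ (acc : List Int) (s : Int), s ∈ PySem.List.pyRange 0 ((zones.length : Int) - rl + 1) 1 →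
      (fun result start =>
        if (PySem.List.slice zones (some start) (some (start + rl))).all (fun z => decide (z ≤ zm)) then
          (PySem.List.pyRange start (start + rl) 1).foldl
            (fun r i => if i ∈ r then r else r ++ [i]) result
        else result) acc s = (fun (acc : List Int) (_ : Int) => acc) acc s := by
    intro acc s _
    simp only
    rw [PySem.List.pyRange_one_eq_nil (by omega)]
    split <;> rfl
  rw [PySem.List.foldl_congr_mem _ _ _ _ hcong, PySem.List.foldl_ignore]

-- the window at start k is good: one fold step of A extends the invariant
theorem pvA_step (zones : List Int) (zm : Int) (R : Nat) (hR : 1 ≤ R) (k : Nat)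
    (hk : k < zones.length + 1 - R) :
    (if (PySem.List.slice zones (some (k : Int)) (some ((k : Int) + (R : Int)))).all
          (fun z => decide (z ≤ zm)) then
        (PySem.List.pyRange (k : Int) ((k : Int) + (R : Int)) 1).foldl
          (fun r i => if i ∈ r then r else r ++ [i]) (pvFA zones zm R k)
      else pvFA zones zm R k) = pvFA zones zm R (k + 1) := by
  have hkR : k + R ≤ zones.length := by omega
  rw [PySem.List.slice_natCast_add]
  by_cases hw : ((List.drop k zones).take R).all (fun z => decide (z ≤ zm)) = true
  · rw [if_pos hw]
    have hWin : ∀ j, j < k + R → k ≤ j → zones.getD j 0 ≤ zm :=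
      (pvWindowAll zones zm R k hkR).mp hw
    have hrange : ((k : Int) + (R : Int)) = ((k + R : Nat) : Int) := by push_cast; ring
    rw [hrange, pvPyRangeNat k (k + R)]
    have hRR : k + R - k = R := by omega
    rw [hRR]
    have hnd : ((List.range' k R).map (fun (j : Nat) => (j : Int))).Nodup := by
      apply List.Nodup.map
      · intro a b hab
        simpa using hab
      · exact List.nodup_range'
    rw [pvFoldlDedup _ _ hnd, List.filter_map]
    have hfc : (List.range' k R).filter ((fun i => !(decide (i ∈ pvFA zones zm R k))) ∘ (fun (j : Nat) => (j : Int)))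
        = (List.range' k R).filter (fun j => !(pvPA zones zm R k j)) := by
      apply List.filter_congr
      intro j hj
      have hjb := List.mem_range'_1.mp hj
      simp only [Function.comp_apply, pvFA]
      exact congrArg (fun b => !b) (pvMemCastFilter (pvPA zones zm R k) zones.length j (by omega))
    rw [hfc]
    have hfilters : (List.range zones.length).filter (pvPA zones zm R (k + 1))
        = (List.range zones.length).filter (pvPA zones zm R k)
          ++ (List.range' k R).filter (fun j => !(pvPA zones zm R k j)) := by
      have hpt : ∀ x, pvPA zones zm R (k + 1) x
          = (pvPA zones zm R k x || (decide (k ≤ x) && decide (x < k + R))) := by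
        intro x
        apply Bool.coe_iff_coe.mp
        rw [pvPA_iff zones zm R (k + 1) x]
        simp only [Bool.or_eq_true, Bool.and_eq_true, decide_eq_true_eq]
        constructor
        · rintro ⟨s', hs', h1, h2, hwin⟩
          rcases Nat.lt_succ_iff_lt_or_eq.mp hs' with h | h
          · exact Or.inl ((pvPA_iff zones zm R k x).mpr ⟨s', h, h1, h2, hwin⟩)
          · subst h
            exact Or.inr ⟨h1, h2⟩
        · rintro (hpk | ⟨h1, h2⟩)
          · obtain ⟨s', hs', rest⟩ := (pvPA_iff zones zm R k x).mp hpk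
            exact ⟨s', by omega, rest⟩
          · exact ⟨k, by omega, h1, h2, fun j hj1 hj2 => hWin j hj1 hj2⟩
      rw [List.filter_congr (fun x _ => hpt x)]
      rw [pvFilterOrSplit (pvPA zones zm R k)
        (fun x => decide (k ≤ x) && decide (x < k + R)) (List.range zones.length)
        List.pairwise_lt_range]
      · congr 1
        exact pvFilterInterval (fun x => !(pvPA zones zm R k x)) k R zones.length hkR
      · intro i j _ _ hpi hqj hpj
        by_contra hc
        obtain ⟨s', hs', h1, h2, hwin⟩ := (pvPA_iff zones zm R k i).mp hpi
        have hqj' : k ≤ j ∧ j < k + R := by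
          have := Bool.and_eq_true_iff.mp hqj
          exact ⟨of_decide_eq_true this.1, of_decide_eq_true this.2⟩
        have : pvPA zones zm R k j = true :=
          (pvPA_iff zones zm R k j).mpr ⟨s', hs', by omega, by omega, hwin⟩
        rw [this] at hpj
        exact absurd hpj (by simp)
    simp only [pvFA, pvCast, hfilters, List.map_append]
  · rw [if_neg hw]
    have hnw : ¬ (∀ j, j < k + R → k ≤ j → zones.getD j 0 ≤ zm) :=
      fun hh => hw ((pvWindowAll zones zm R k hkR).mpr hh)
    have hpt : ∀ x, pvPA zones zm R (k + 1) x = pvPA zones zm R k x := by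
      intro x
      apply Bool.coe_iff_coe.mp
      rw [pvPA_iff zones zm R (k + 1) x, pvPA_iff zones zm R k x]
      constructor
      · rintro ⟨s', hs', h1, h2, hwin⟩
        rcases Nat.lt_succ_iff_lt_or_eq.mp hs' with h | h
        · exact ⟨s', h, h1, h2, hwin⟩
        · subst h
          exact absurd (fun j hj1 hj2 => hwin j hj1 hj2) hnw
      · rintro ⟨s', hs', rest⟩
        exact ⟨s', by omega, rest⟩
    simp only [pvFA, pvCast]
    rw [List.filter_congr (fun x _ => (hpt x).symm)]

-- A computes the invariant at the last window start
theorem pvA_eq (zones : List Int) (rl zm : Int) (hrl : 1 ≤ rl) :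
    all_within_zone_py zones rl zm
      = pvFA zones zm rl.toNat (zones.length + 1 - rl.toNat) := by
  have hA : all_within_zone_py zones rl zm
      = (PySem.List.pyRange 0 ((zones.length : Int) - rl + 1) 1).foldl
          (fun result start =>
            if (PySem.List.slice zones (some start) (some (start + rl))).all (fun z => decide (z ≤ zm)) then
              (PySem.List.pyRange start (start + rl) 1).foldl
                (fun r i => if i ∈ r then r else r ++ [i]) result
            else result) [] := rfl
  rw [hA]
  set n := zones.length with hn
  set R := rl.toNat with hRdef
  have hR : 1 ≤ R := by omega
  have hrlR : rl = (R : Int) := by omega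
  have houter : PySem.List.pyRange 0 ((n : Int) - rl + 1) 1
      = (List.range (n + 1 - R)).map (fun (j : Nat) => (j : Int)) := by
    by_cases hRn : R ≤ n + 1
    · have hb : (n : Int) - rl + 1 = ((n + 1 - R : Nat) : Int) := by omega
      rw [hb]
      have h0 : (0 : Int) = ((0 : Nat) : Int) := rfl
      rw [h0, pvPyRangeNat 0 (n + 1 - R)]
      rw [List.range_eq_range']
      congr 1
    · rw [PySem.List.pyRange_one_eq_nil (by omega)]
      have h2 : n + 1 - R = 0 := by omega
      rw [h2]
      rfl
  rw [houter, List.foldl_map]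
  have h0 : pvFA zones zm R 0 = [] := by
    have : (List.range n).filter (pvPA zones zm R 0) = [] := by
      rw [List.filter_eq_nil_iff]
      intro a _
      simp [pvPA]
    simp [pvFA, pvCast, ← hn, this]
  apply pvFoldlRangeInv _ (pvFA zones zm R) (n + 1 - R) _ h0
  intro k hk
  rw [hrlR]
  exact pvA_step zones zm R hR k hk
theorem pvPyRangeNat0 (n : Nat) :
    PySem.List.pyRange 0 (n : Int) 1 = (List.range n).map (fun (j : Nat) => (j : Int)) := by
  have := pvPyRangeNat 0 n
  simpa [List.range_eq_range'] using this

-- one fold step of B, good point: state unchanged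
theorem pvB_step_good (zones : List Int) (zm : Int) (R k : Nat) (hg : zones.getD k 0 ≤ zm) :
    pvFB zones zm R k = pvFB zones zm R (k + 1) ∧ pvRS zones zm k = pvRS zones zm (k + 1) := by
  constructor
  · have hpt : ∀ x, pvPB zones zm R (k + 1) x = pvPB zones zm R k x := by
      intro x
      apply Bool.coe_iff_coe.mp
      rw [pvPB_iff zones zm R (k + 1) x, pvPB_iff zones zm R k x]
      constructor
      · rintro ⟨b, hb, hbad, rest⟩
        rcases Nat.lt_succ_iff_lt_or_eq.mp hb with h | h
        · exact ⟨b, h, hbad, rest⟩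
        · subst h
          exact absurd hg hbad
      · rintro ⟨b, hb, rest⟩
        exact ⟨b, by omega, rest⟩
    simp only [pvFB, pvCast]
    rw [List.filter_congr (fun x _ => hpt x)]
  · have hs : pvRS zones zm (k + 1) = if zones.getD k 0 ≤ zm then pvRS zones zm k else k + 1 := rfl
    rw [hs, if_pos hg]

-- one fold step of B, bad point, current run long enough: the run's indices are appended
theorem pvB_step_emit (zones : List Int) (zm : Int) (R k : Nat) (hk : k ≤ zones.length)
    (hg : ¬ (zones.getD k 0 ≤ zm)) (hlen : R ≤ k - pvRS zones zm k) :
    pvFB zones zm R k ++ pvCast (List.range' (pvRS zones zm k) (k - pvRS zones zm k))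
      = pvFB zones zm R (k + 1) := by
  have hrsk := pvRS_le zones zm k
  have hfilters : (List.range zones.length).filter (pvPB zones zm R (k + 1))
      = (List.range zones.length).filter (pvPB zones zm R k)
        ++ List.range' (pvRS zones zm k) (k - pvRS zones zm k) := by
    have hpt : ∀ x, pvPB zones zm R (k + 1) x
        = (pvPB zones zm R k x
            || (decide (pvRS zones zm k ≤ x) && decide (x < pvRS zones zm k + (k - pvRS zones zm k)))) := by
      intro x
      apply Bool.coe_iff_coe.mp
      rw [pvPB_iff zones zm R (k + 1) x]
      simp only [Bool.or_eq_true, Bool.and_eq_true, decide_eq_true_eq]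
      constructor
      · rintro ⟨b, hb, hbad, a, hax, hxb, hba, hgood⟩
        rcases Nat.lt_succ_iff_lt_or_eq.mp hb with h | h
        · exact Or.inl ((pvPB_iff zones zm R k x).mpr ⟨b, h, hbad, a, hax, hxb, hba, hgood⟩)
        · subst h
          have hrs : pvRS zones zm b ≤ a :=
            pvRS_min zones zm b a (fun j h1 h2 => hgood j h2 h1) (by omega)
          exact Or.inr ⟨by omega, by omega⟩
      · rintro (hpk | ⟨h1, h2⟩)
        · obtain ⟨b, hb, rest⟩ := (pvPB_iff zones zm R k x).mp hpk
          exact ⟨b, by omega, rest⟩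
        · exact ⟨k, by omega, hg, pvRS zones zm k, h1, by omega, hlen,
            fun j hj1 hj2 => pvRS_good zones zm k j hj2 hj1⟩
    rw [List.filter_congr (fun x _ => hpt x)]
    rw [pvFilterOrSplit (pvPB zones zm R k)
      (fun x => decide (pvRS zones zm k ≤ x) && decide (x < pvRS zones zm k + (k - pvRS zones zm k)))
      (List.range zones.length) List.pairwise_lt_range]
    · congr 1
      rw [pvFilterInterval (fun x => !(pvPB zones zm R k x)) (pvRS zones zm k) (k - pvRS zones zm k)
        zones.length (by omega)]
      apply List.filter_eq_self.mpr
      intro a ha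
      have hb := List.mem_range'_1.mp ha
      have hne : pvPB zones zm R k a ≠ true := by
        intro h
        have := pvPBlt zones zm R k a h
        omega
      simp [hne]
    · intro i j _ _ hpi hqj hpj
      have hlt := pvPBlt zones zm R k i hpi
      have hqj' := Bool.and_eq_true_iff.mp hqj
      have := of_decide_eq_true hqj'.1
      omega
  simp only [pvFB, pvCast, hfilters, List.map_append]

-- one fold step of B, bad point, run too short: nothing is emitted
theorem pvB_step_skip (zones : List Int) (zm : Int) (R k : Nat)
    (hg : ¬ (zones.getD k 0 ≤ zm)) (hlen : ¬ R ≤ k - pvRS zones zm k) :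
    pvFB zones zm R k = pvFB zones zm R (k + 1) := by
  have hpt : ∀ x, pvPB zones zm R (k + 1) x = pvPB zones zm R k x := by
    intro x
    apply Bool.coe_iff_coe.mp
    rw [pvPB_iff zones zm R (k + 1) x, pvPB_iff zones zm R k x]
    constructor
    · rintro ⟨b, hb, hbad, a, hax, hxb, hba, hgood⟩
      rcases Nat.lt_succ_iff_lt_or_eq.mp hb with h | h
      · exact ⟨b, h, hbad, a, hax, hxb, hba, hgood⟩
      · subst h
        have hrs : pvRS zones zm b ≤ a :=
          pvRS_min zones zm b a (fun j h1 h2 => hgood j h2 h1) (by omega)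
        omega
    · rintro ⟨b, hb, rest⟩
      exact ⟨b, by omega, rest⟩
  simp only [pvFB, pvCast]
  rw [List.filter_congr (fun x _ => hpt x)]

-- B computes its run invariant, then flushes the final run
theorem pvB_eq (zones : List Int) (rl zm : Int) (hrl : 1 ≤ rl) :
    all_within_zone_py_alt zones rl zm
      = pvFB zones zm rl.toNat zones.length
        ++ (if rl.toNat ≤ zones.length - pvRS zones zm zones.length
            then pvCast (List.range' (pvRS zones zm zones.length)
                          (zones.length - pvRS zones zm zones.length))
            else []) := by
  set n := zones.length with hn
  set R := rl.toNat with hRdef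
  have hR : 1 ≤ R := by omega
  have hrlR : rl = (R : Int) := by omega
  have hB : all_within_zone_py_alt zones rl zm
      = (if rl ≤ (n : Int) - (((List.range zones.length).map ((fun iz => ((iz : Int), PySem.List.pyGetD zones iz 0)) ∘ (fun (j : Nat) => (j : Int)))).foldl
        (fun (st : List Int × Int) iz =>
          if iz.2 > zm then
            (if rl ≤ iz.1 - st.2 then st.1 ++ PySem.List.pyRange st.2 iz.1 1 else st.1, iz.1 + 1)
          else st) ([], 0)).2 then (((List.range zones.length).map ((fun iz => ((iz : Int), PySem.List.pyGetD zones iz 0)) ∘ (fun (j : Nat) => (j : Int)))).foldl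
        (fun (st : List Int × Int) iz =>
          if iz.2 > zm then
            (if rl ≤ iz.1 - st.2 then st.1 ++ PySem.List.pyRange st.2 iz.1 1 else st.1, iz.1 + 1)
          else st) ([], 0)).1 ++ PySem.List.pyRange (((List.range zones.length).map ((fun iz => ((iz : Int), PySem.List.pyGetD zones iz 0)) ∘ (fun (j : Nat) => (j : Int)))).foldl
        (fun (st : List Int × Int) iz =>
          if iz.2 > zm then
            (if rl ≤ iz.1 - st.2 then st.1 ++ PySem.List.pyRange st.2 iz.1 1 else st.1, iz.1 + 1)
          else st) ([], 0)).2 (n : Int) 1 else (((List.range zones.length).map ((fun iz => ((iz : Int), PySem.List.pyGetD zones iz 0)) ∘ (fun (j : Nat) => (j : Int)))).foldl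
        (fun (st : List Int × Int) iz =>
          if iz.2 > zm then
            (if rl ≤ iz.1 - st.2 then st.1 ++ PySem.List.pyRange st.2 iz.1 1 else st.1, iz.1 + 1)
          else st) ([], 0)).1) := by
    unfold all_within_zone_py_alt
    rw [if_neg (by omega : ¬ rl ≤ 0)]
    rw [PySem.List.enumerate_eq_map_pyRange zones 0, PySem.List.len_eq, pvPyRangeNat0 n, List.map_map]
  rw [hB]
  have hfold : (((List.range zones.length).map ((fun iz => ((iz : Int), PySem.List.pyGetD zones iz 0)) ∘ (fun (j : Nat) => (j : Int)))).foldl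
        (fun (st : List Int × Int) iz =>
          if iz.2 > zm then
            (if rl ≤ iz.1 - st.2 then st.1 ++ PySem.List.pyRange st.2 iz.1 1 else st.1, iz.1 + 1)
          else st) ([], 0)) = (pvFB zones zm R n, ((pvRS zones zm n : Nat) : Int)) := by
    rw [List.foldl_map]
    apply pvFoldlRangeInv _ (fun k => (pvFB zones zm R k, ((pvRS zones zm k : Nat) : Int))) n
    · have h1 : pvFB zones zm R 0 = [] := by
        have : (List.range n).filter (pvPB zones zm R 0) = [] := by
          rw [List.filter_eq_nil_iff]
          intro a _
          simp [pvPB]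
        simp [pvFB, pvCast, ← hn, this]
      have h2 : pvRS zones zm 0 = 0 := rfl
      rw [h1, h2]
      rfl
    · intro k hk
      simp only [Function.comp_apply, PySem.List.pyGetD_natCast]
      by_cases hg : zones.getD k 0 ≤ zm
      · rw [if_neg (by omega : ¬ zones.getD k 0 > zm)]
        obtain ⟨hfb, hrs⟩ := pvB_step_good zones zm R k hg
        rw [hfb, hrs]
      · rw [if_pos (by omega : zones.getD k 0 > zm)]
        have hrsk := pvRS_le zones zm k
        have hrs1 : pvRS zones zm (k + 1) = k + 1 := by
          unfold pvRS
          rw [if_neg hg]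
        by_cases hlen : R ≤ k - pvRS zones zm k
        · rw [if_pos (by rw [hrlR]; omega)]
          rw [pvPyRangeNat (pvRS zones zm k) k]
          have := pvB_step_emit zones zm R k (by omega) hg hlen
          simp only [pvCast] at this
          rw [this, hrs1]
          have : ((k : Int) + 1) = ((k + 1 : Nat) : Int) := by push_cast; ring
          rw [this]
        · rw [if_neg (by rw [hrlR]; omega)]
          rw [← pvB_step_skip zones zm R k hg hlen, hrs1]
          have : ((k : Int) + 1) = ((k + 1 : Nat) : Int) := by push_cast; ring
          rw [this]
  rw [hfold]
  have hrsn := pvRS_le zones zm n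
  by_cases hf : R ≤ n - pvRS zones zm n
  · rw [if_pos (by rw [hrlR]; omega), if_pos hf]
    rw [pvPyRangeNat (pvRS zones zm n) n]
    rfl
  · rw [if_neg (by rw [hrlR]; omega), if_neg hf, List.append_nil]

-- any run of ≥ R good points containing x yields a good window through x
theorem pvWindowOfRun (zones : List Int) (zm : Int) (R : Nat) (hR : 1 ≤ R)
    (a b x : Nat) (hax : a ≤ x) (hxb : x < b) (hba : R ≤ b - a) (hbn : b ≤ zones.length)
    (hgood : ∀ j, a ≤ j → j < b → zones.getD j 0 ≤ zm) :
    pvPA zones zm R (zones.length + 1 - R) x = true := by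
  refine (pvPA_iff zones zm R (zones.length + 1 - R) x).mpr ?_
  by_cases hcase : x < a + R
  · exact ⟨a, by omega, by omega, by omega, fun j h1 h2 => hgood j h2 (by omega)⟩
  · exact ⟨x + 1 - R, by omega, by omega, by omega, fun j h1 h2 => hgood j (by omega) (by omega)⟩

-- A's indices are exactly B's emitted indices plus the final flushed run
theorem pvQualIff (zones : List Int) (zm : Int) (R : Nat) (hR : 1 ≤ R) (x : Nat) :
    pvPA zones zm R (zones.length + 1 - R) x = true
      ↔ (pvPB zones zm R zones.length x = true
          ∨ (R ≤ zones.length - pvRS zones zm zones.length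
             ∧ pvRS zones zm zones.length ≤ x ∧ x < zones.length)) := by
  set n := zones.length with hn
  constructor
  · intro h
    obtain ⟨s', hs', h1, h2, hwin⟩ := (pvPA_iff zones zm R (n + 1 - R) x).mp h
    have hsRn : s' + R ≤ n := by omega
    by_cases hbad : ∃ b, b < n ∧ s' ≤ b ∧ ¬ (zones.getD b 0 ≤ zm)
    · left
      have hb0 := Nat.find_spec hbad
      set b0 := Nat.find hbad with hb0def
      have hmin : ∀ m, m < b0 → ¬ (m < n ∧ s' ≤ m ∧ ¬ (zones.getD m 0 ≤ zm)) :=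
        fun m hm => Nat.find_min hbad hm
      have hgood' : ∀ j, s' ≤ j → j < b0 → zones.getD j 0 ≤ zm := by
        intro j hj1 hj2
        by_contra hc
        exact (hmin j hj2) ⟨by omega, hj1, hc⟩
      have hb0R : s' + R ≤ b0 := by
        by_contra hc
        exact hb0.2.2 (hwin b0 (by omega) hb0.2.1)
      refine (pvPB_iff zones zm R n x).mpr ⟨b0, hb0.1, hb0.2.2, s', h1, by omega, by omega, ?_⟩
      exact fun j hj1 hj2 => hgood' j hj2 hj1
    · right
      push Not at hbad
      have hgood' : ∀ j, s' ≤ j → j < n → zones.getD j 0 ≤ zm := fun j h1 h2 => hbad j h2 h1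
      have hrs : pvRS zones zm n ≤ s' := pvRS_min zones zm n s' hgood' (by omega)
      exact ⟨by omega, by omega, by omega⟩
  · rintro (h | ⟨hflen, h1, h2⟩)
    · obtain ⟨b, hb, hbad, a, hax, hxb, hba, hgood⟩ := (pvPB_iff zones zm R n x).mp h
      exact pvWindowOfRun zones zm R hR a b x hax hxb hba (by omega)
        (fun j h1 h2 => hgood j h2 h1)
    · exact pvWindowOfRun zones zm R hR (pvRS zones zm n) n x h1 h2 hflen (by omega)
        (fun j hj1 hj2 => pvRS_good zones zm n j hj1 hj2)

-- A's final state is B's final state plus the flushed run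
theorem pvDecomp (zones : List Int) (zm : Int) (R : Nat) (hR : 1 ≤ R) :
    pvFA zones zm R (zones.length + 1 - R)
      = pvFB zones zm R zones.length
        ++ (if R ≤ zones.length - pvRS zones zm zones.length
            then pvCast (List.range' (pvRS zones zm zones.length)
                          (zones.length - pvRS zones zm zones.length))
            else []) := by
  set n := zones.length with hn
  set rs := pvRS zones zm n with hrsdef
  have hrsn : rs ≤ n := pvRS_le zones zm n
  by_cases hf : R ≤ n - rs
  · rw [if_pos hf]
    have hfilters : (List.range n).filter (pvPA zones zm R (n + 1 - R))
        = (List.range n).filter (pvPB zones zm R n) ++ List.range' rs (n - rs) := by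
      have hpt : ∀ x, pvPA zones zm R (n + 1 - R) x
          = (pvPB zones zm R n x || (decide (rs ≤ x) && decide (x < rs + (n - rs)))) := by
        intro x
        apply Bool.coe_iff_coe.mp
        rw [pvQualIff zones zm R hR x]
        simp only [Bool.or_eq_true, Bool.and_eq_true, decide_eq_true_eq, ← hn, ← hrsdef]
        constructor
        · rintro (h | ⟨-, h1, h2⟩)
          · exact Or.inl h
          · exact Or.inr ⟨h1, by omega⟩
        · rintro (h | ⟨h1, h2⟩)
          · exact Or.inl h
          · exact Or.inr ⟨hf, h1, by omega⟩
      rw [List.filter_congr (fun x _ => hpt x)]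
      rw [pvFilterOrSplit (pvPB zones zm R n)
        (fun x => decide (rs ≤ x) && decide (x < rs + (n - rs)))
        (List.range n) List.pairwise_lt_range]
      · congr 1
        rw [pvFilterInterval (fun x => !(pvPB zones zm R n x)) rs (n - rs) n (by omega)]
        apply List.filter_eq_self.mpr
        intro a ha
        have hb := List.mem_range'_1.mp ha
        have hne : pvPB zones zm R n a ≠ true := by
          intro h
          have := pvPBlt zones zm R n a h
          omega
        simp [hne]
      · intro i j _ _ hpi hqj hpj
        have hlt := pvPBlt zones zm R n i hpi
        have hqj' := Bool.and_eq_true_iff.mp hqj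
        have := of_decide_eq_true hqj'.1
        omega
    simp only [pvFA, pvFB, pvCast]
    rw [← hn, hfilters, List.map_append]
  · rw [if_neg hf, List.append_nil]
    have hpt : ∀ x, pvPA zones zm R (n + 1 - R) x = pvPB zones zm R n x := by
      intro x
      apply Bool.coe_iff_coe.mp
      rw [pvQualIff zones zm R hR x]
      simp only [← hn, ← hrsdef]
      constructor
      · rintro (h | ⟨hflen, -, -⟩)
        · exact h
        · exact absurd hflen hf
      · exact fun h => Or.inl h
    simp only [pvFA, pvFB, pvCast]
    rw [List.filter_congr (fun x _ => hpt x)]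

-- ===== VERDICT (by name: the statement is the Claim_ definition above) =====
theorem all_within_zone_py_spec : Claim_equal_all_within_zone_py := by
  unfold Claim_equal_all_within_zone_py Spec_all_within_zone_py
  intro zones rl zm _
  by_cases hrl : rl ≤ 0
  · rw [pvA_trivial zones rl zm hrl]
    unfold all_within_zone_py_alt
    rw [if_pos hrl]
  · have h1 : 1 ≤ rl := by omega
    have hR : 1 ≤ rl.toNat := by omega
    rw [pvA_eq zones rl zm h1, pvB_eq zones rl zm h1, pvDecomp zones zm rl.toNat hR]
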